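-- pv_equiv track=rewrite | github.com/fonisia-cloud/clinical_topic_discovery | core/jcr_integration.py | _best_quartile
-- ===== SOURCE A (Python) =====
-- from typing import Dict, Iterable, Tuple
--
-- def _best_quartile(values: Iterable[str]) -> str | None:
--     order = {"Q1": 1, "Q2": 2, "Q3": 3, "Q4": 4}
--     cleaned = []
--     for value in values:
--         text = str(value).strip().upper()
--         if text in order:
--             cleaned.append(text)
--     if not cleaned:
--         return None
--     return sorted(cleaned, key=lambda x: order[x])[0]
-- ===== SOURCE B (Python) =====
-- def _best_quartile(values):
--     order = {"Q1": 1, "Q2": 2, "Q3": 3, "Q4": 4}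
--     best = None
--     best_rank = 5
--     for value in values:
--         text = str(value).strip().upper()
--         rank = order.get(text)
--         if rank is not None and rank < best_rank:
--             best_rank = rank
--             best = text
--     return best
-- ===== Notes on version B (the rewrite author's own statement) =====
-- stated objective: simpler
-- what changed: Replaced A's two-phase build-a-filtered-list-then-stable-sort-and-take-head with a single fused pass that tracks the best rank and string seen so far, never materializing the intermediate list.
import Mathlib
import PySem

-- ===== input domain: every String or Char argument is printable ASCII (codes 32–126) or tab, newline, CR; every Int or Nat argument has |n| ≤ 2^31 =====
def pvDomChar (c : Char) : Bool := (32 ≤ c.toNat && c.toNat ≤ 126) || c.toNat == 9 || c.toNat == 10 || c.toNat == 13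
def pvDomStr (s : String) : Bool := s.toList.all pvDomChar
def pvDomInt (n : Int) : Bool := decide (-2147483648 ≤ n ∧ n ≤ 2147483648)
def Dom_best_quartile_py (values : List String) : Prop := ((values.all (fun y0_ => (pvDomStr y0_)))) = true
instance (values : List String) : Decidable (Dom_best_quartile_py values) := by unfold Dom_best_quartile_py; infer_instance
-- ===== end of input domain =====

-- B replaces A's build-filtered-list / stable-sort / take-head pipeline by a single fused pass
-- that tracks the best (lowest-rank) quartile string seen so far (simpler decomposition).


-- ===== PORT A =====
-- order = {"Q1": 1, "Q2": 2, "Q3": 3, "Q4": 4} (same literal dict in A and B)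
def pvOrder : PySem.Dict String Int :=
  ((((PySem.Dict.empty).insert "Q1" 1).insert "Q2" 2).insert "Q3" 3).insert "Q4" 4

def best_quartile_py (values : List String) : Option String :=
  let cleaned := values.foldl (fun acc value =>
    let text := PySem.Str.upper (PySem.Str.strip value)
    if (PySem.Dict.get? pvOrder text).isSome then acc ++ [text] else acc) []
  if cleaned = [] then none
  else (PySem.List.sorted cleaned (fun x => PySem.Dict.getD pvOrder x 0) false).head?

-- ===== PORT B =====
def best_quartile_py_alt (values : List String) : Option String :=
  (values.foldl (fun (st : Option String × Int) value =>
    let text := PySem.Str.upper (PySem.Str.strip value)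
    match PySem.Dict.get? pvOrder text with
    | some rank => if rank < st.2 then (some text, rank) else st
    | none => st) (none, 5)).1

-- ===== PRECONDITION & SPEC =====
def Spec_best_quartile_py (values : List String) (out : Option String) : Prop := out = best_quartile_py_alt values
instance (values : List String) (out : Option String) : Decidable (Spec_best_quartile_py values out) := by unfold Spec_best_quartile_py; infer_instance

-- ===== CLAIM (what is proved, stated in full; the proofs are below) =====
def Claim_equal_best_quartile_py : Prop := ∀ (values : List String), Dom_best_quartile_py values → Spec_best_quartile_py values (best_quartile_py values)

-- ===== LEMMAS AND PROOFS =====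

def pvKeys : List String := ["Q1", "Q2", "Q3", "Q4"]

-- both programs reduce to this membership-based closed form on the cleaned list
def pvBest (l : List String) : Option String :=
  if "Q1" ∈ l then some "Q1" else if "Q2" ∈ l then some "Q2"
  else if "Q3" ∈ l then some "Q3" else if "Q4" ∈ l then some "Q4" else none

lemma pvGet_isSome_mem (t : String) (h : (PySem.Dict.get? pvOrder t).isSome) : t ∈ pvKeys := by
  by_contra hn
  simp [pvKeys] at hn
  obtain ⟨h1, h2, h3, h4⟩ := hn
  rw [show pvOrder = PySem.Dict.mk [("Q1",1),("Q2",2),("Q3",3),("Q4",4)] from rfl] at h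
  simp [beq_iff_eq, Ne.symm h1, Ne.symm h2, Ne.symm h3, Ne.symm h4, PySem.Dict.get?] at h

lemma pvRank_of_mem (t : String) (h : t ∈ pvKeys) :
    PySem.Dict.getD pvOrder t 0 = (if t = "Q1" then 1 else if t = "Q2" then 2 else if t = "Q3" then 3 else 4) := by
  simp [pvKeys] at h
  rcases h with h | h | h | h <;> subst h <;> decide

-- B-side invariant: the one-pass fold over a list of valid quartile keys, from any state
set_option maxHeartbeats 1000000 in
lemma pvFoldB (l : List String) : (∀ t ∈ l, t ∈ pvKeys) → ∀ (b : Option String) (r : Int),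
    l.foldl (fun st t =>
      match PySem.Dict.get? pvOrder t with
      | some rank => if rank < st.2 then (some t, rank) else st
      | none => st) (b, r) =
    (if "Q1" ∈ l ∧ 1 < r then (some "Q1", 1)
     else if "Q2" ∈ l ∧ 2 < r then (some "Q2", 2)
     else if "Q3" ∈ l ∧ 3 < r then (some "Q3", 3)
     else if "Q4" ∈ l ∧ 4 < r then (some "Q4", 4)
     else (b, r)) := by
  induction l with
  | nil => simp
  | cons x xs ih =>
    intro hl b r
    have hx := hl x (List.mem_cons_self)
    have hxs : ∀ t ∈ xs, t ∈ pvKeys := fun t ht => hl t (List.mem_cons_of_mem _ ht)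
    simp [pvKeys] at hx
    rcases hx with hx | hx | hx | hx <;> subst hx <;>
      simp only [List.foldl_cons, show PySem.Dict.get? pvOrder "Q1" = some 1 from rfl,
        show PySem.Dict.get? pvOrder "Q2" = some 2 from rfl,
        show PySem.Dict.get? pvOrder "Q3" = some 3 from rfl,
        show PySem.Dict.get? pvOrder "Q4" = some 4 from rfl, List.mem_cons] <;>
      split_ifs <;> rw [ih hxs] <;> split_ifs <;>
      simp_all only [List.mem_cons, not_or, not_and, not_lt, String.reduceEq, false_or, true_or,
        or_true, or_false, false_and, true_and, and_true, and_false, Prod.mk.injEq,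
        Option.some.injEq, and_self, not_false_eq_true, true_implies, false_implies] <;>
      first | omega | tauto

-- A-side: the head of the stable sort by rank is pvBest
lemma pvSortA (l : List String) (hl : ∀ t ∈ l, t ∈ pvKeys) (hne : l ≠ []) :
    (PySem.List.sorted l (fun x => PySem.Dict.getD pvOrder x 0) false).head? = pvBest l := by
  rcases hs : PySem.List.sorted l (fun x => PySem.Dict.getD pvOrder x 0) false with _ | ⟨m, t⟩
  · rcases l with _ | ⟨x, xs⟩
    · exact absurd rfl hne
    · have hx : x ∈ PySem.List.sorted (x :: xs) (fun x => PySem.Dict.getD pvOrder x 0) false :=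
        (PySem.List.mem_sorted _ _ _ _).mpr List.mem_cons_self
      rw [hs] at hx; exact absurd hx (List.not_mem_nil)
  have hmem : m ∈ l := by
    have := PySem.List.mem_sorted l (fun x => PySem.Dict.getD pvOrder x 0) false m
    rw [hs] at this; exact this.mp List.mem_cons_self
  have hmin : ∀ y ∈ l, PySem.Dict.getD pvOrder m 0 ≤ PySem.Dict.getD pvOrder y 0 :=
    PySem.List.key_head_sorted_le _ _ hs
  have hm := hl m hmem
  have hrm := pvRank_of_mem m hm
  simp [pvKeys] at hm
  unfold pvBest
  split_ifs with h1 h2 h3 h4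
  · have := hmin _ h1
    rcases hm with h | h | h | h <;> subst h <;>
      simp_all [show PySem.Dict.getD pvOrder "Q1" 0 = 1 from rfl,
        show PySem.Dict.getD pvOrder "Q2" 0 = 2 from rfl,
        show PySem.Dict.getD pvOrder "Q3" 0 = 3 from rfl,
        show PySem.Dict.getD pvOrder "Q4" 0 = 4 from rfl]
  · have := hmin _ h2
    rcases hm with h | h | h | h <;> subst h <;>
      simp_all [show PySem.Dict.getD pvOrder "Q1" 0 = 1 from rfl,
        show PySem.Dict.getD pvOrder "Q2" 0 = 2 from rfl,
        show PySem.Dict.getD pvOrder "Q3" 0 = 3 from rfl,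
        show PySem.Dict.getD pvOrder "Q4" 0 = 4 from rfl]
  · have := hmin _ h3
    rcases hm with h | h | h | h <;> subst h <;>
      simp_all [show PySem.Dict.getD pvOrder "Q1" 0 = 1 from rfl,
        show PySem.Dict.getD pvOrder "Q2" 0 = 2 from rfl,
        show PySem.Dict.getD pvOrder "Q3" 0 = 3 from rfl,
        show PySem.Dict.getD pvOrder "Q4" 0 = 4 from rfl]
  · have := hmin _ h4
    rcases hm with h | h | h | h <;> subst h <;>
      simp_all [show PySem.Dict.getD pvOrder "Q1" 0 = 1 from rfl,
        show PySem.Dict.getD pvOrder "Q2" 0 = 2 from rfl,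
        show PySem.Dict.getD pvOrder "Q3" 0 = 3 from rfl,
        show PySem.Dict.getD pvOrder "Q4" 0 = 4 from rfl]
  · rcases hm with h | h | h | h <;> subst h <;> [exact absurd hmem h1; exact absurd hmem h2;
      exact absurd hmem h3; exact absurd hmem h4]

-- ===== VERDICT (by name: the statement is the Claim_ definition above) =====
set_option maxHeartbeats 1000000 in
theorem best_quartile_py_spec : Claim_equal_best_quartile_py := by
  intro values _
  unfold Spec_best_quartile_py best_quartile_py best_quartile_py_alt
  have hA : values.foldl (fun acc value =>
      let text := PySem.Str.upper (PySem.Str.strip value)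
      if (PySem.Dict.get? pvOrder text).isSome then acc ++ [text] else acc) ([] : List String)
      = ((values.filter (fun v => (PySem.Dict.get? pvOrder (PySem.Str.upper (PySem.Str.strip v))).isSome)).map
          (fun v => PySem.Str.upper (PySem.Str.strip v))) := by
    simpa using PySem.List.foldl_append_if
      (fun v => (PySem.Dict.get? pvOrder (PySem.Str.upper (PySem.Str.strip v))).isSome)
      (fun v => PySem.Str.upper (PySem.Str.strip v)) (l := values) (acc := [])
  set cleaned := ((values.filter (fun v => (PySem.Dict.get? pvOrder (PySem.Str.upper (PySem.Str.strip v))).isSome)).map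
      (fun v => PySem.Str.upper (PySem.Str.strip v))) with hc
  have hcl : ∀ t ∈ cleaned, t ∈ pvKeys := by
    intro t ht
    rw [hc, List.mem_map] at ht
    obtain ⟨v, hv, rfl⟩ := ht
    rw [List.mem_filter] at hv
    exact pvGet_isSome_mem _ hv.2
  have hB : cleaned.foldl (fun st t =>
        match PySem.Dict.get? pvOrder t with
        | some rank => if rank < st.2 then (some t, rank) else st
        | none => st) ((none : Option String), (5 : Int))
      = values.foldl (fun (st : Option String × Int) value =>
        let text := PySem.Str.upper (PySem.Str.strip value)
        match PySem.Dict.get? pvOrder text with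
        | some rank => if rank < st.2 then (some text, rank) else st
        | none => st) (none, 5) := by
    rw [hc, List.foldl_map, List.foldl_filter]
    apply PySem.List.foldl_congr_mem
    intro acc x _
    cases h : PySem.Dict.get? pvOrder (PySem.Str.upper (PySem.Str.strip x)) <;> simp [h]
  simp only [hA, ← hB]
  rw [pvFoldB cleaned hcl none 5]
  by_cases hn : cleaned = []
  · simp [hn]
  · rw [if_neg hn, pvSortA cleaned hcl hn]
    unfold pvBest
    norm_num
    split_ifs <;> rfl
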